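-- pv_equiv track=rewrite | github.com/navvidu/web_lab_aib_frontend | labs/Lab_12_python_intro/solution/task3.py | text_histogram
-- ===== SOURCE A (Python) =====
-- def text_histogram(input_text):
--     count_ch = {}
--     for char in input_text:
--         if char not in (' ', '\n'):
--             count_ch[char] = count_ch.get(char, 0) + 1
--     max_count = max(count_ch.values())
--     histogram = []
--     for i in range(max_count, 0, -1):
--         row = ''
--         for char in sorted(count_ch.keys()):
--             if count_ch[char] >= i:
--                 row += '#'
--             else:
--                 row += ' '
--         histogram.append(row)
--     histogram.append(''.join(sorted(count_ch.keys())))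
--     return '\n'.join(histogram)
-- ===== SOURCE B (Python) =====
-- def text_histogram(input_text):
--     filtered = [c for c in input_text if c not in (' ', '\n')]
--     chars = sorted(set(filtered))
--     counts = [filtered.count(c) for c in chars]
--     max_count = max(counts)
--     columns = [' ' * (max_count - n) + '#' * n for n in counts]
--     lines = [''.join(col[r] for col in columns) for r in range(max_count)]
--     lines.append(''.join(chars))
--     return '\n'.join(lines)
-- ===== Notes on version B (the rewrite author's own statement) =====
-- stated objective: alternative
-- what changed: B builds the histogram column-by-column (one vertical bar string per character, padded with spaces) and transposes, instead of A's row-by-row scan re-sorting the keys and comparing each count against the current level; counting is a per-distinct-char scan of the filtered list instead of a dict accumulation.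
import Mathlib
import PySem

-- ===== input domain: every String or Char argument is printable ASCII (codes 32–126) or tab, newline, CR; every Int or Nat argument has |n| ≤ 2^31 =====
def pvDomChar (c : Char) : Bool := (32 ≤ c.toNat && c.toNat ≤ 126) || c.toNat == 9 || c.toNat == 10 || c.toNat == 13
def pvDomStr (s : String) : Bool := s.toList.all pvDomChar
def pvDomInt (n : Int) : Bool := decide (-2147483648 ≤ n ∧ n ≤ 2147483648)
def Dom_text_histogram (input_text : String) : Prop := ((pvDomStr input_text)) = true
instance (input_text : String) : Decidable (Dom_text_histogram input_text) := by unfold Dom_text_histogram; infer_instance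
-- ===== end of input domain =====

-- B builds each character's vertical column once and transposes; same return value as A on Pre_.

-- ===== PORT A =====
-- literal transliteration of A: dict-count loop, then rows from level max_count down to 1,
-- re-sorting the keys for every row; `max(count_ch.values())` is PySem.List.max? (none = ValueError).
def text_histogram (input_text : String) : String :=
  let count_ch := input_text.toList.foldl
    (fun d char => if !(char == ' ' || char == '\n')
                   then d.insert char (d.getD char 0 + 1) else d)
    (PySem.Dict.empty : PySem.Dict Char Int)
  match PySem.List.max? count_ch.values (fun x => x) with
  | none => ""  -- Python raises ValueError here; excluded by Pre_
  | some max_count =>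
    let histogram := (PySem.List.pyRange max_count 0 (-1)).foldl
      (fun hist i =>
        hist ++ [(PySem.List.sorted count_ch.keys (fun x => x) false).foldl
          (fun row char => row ++ (if count_ch.getD char 0 ≥ i then "#" else " ")) ""])
      []
    let histogram := histogram ++ [String.ofList (PySem.List.sorted count_ch.keys (fun x => x) false)]
    PySem.Str.join "\n" histogram

-- ===== PORT B =====
-- literal transliteration of Source B: filtered list, sorted distinct chars, per-char counts,
-- one padded column per char, rows by transposition (strings handled as their char lists).
def text_histogram_alt (input_text : String) : String :=
  let filtered := input_text.toList.filter (fun c => !(c == ' ' || c == '\n'))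
  let chars := PySem.List.sorted (PySem.Set.ofList filtered) (fun x => x) false
  let counts := chars.map (fun c => (filtered.count c : Int))
  match PySem.List.max? counts (fun x => x) with
  | none => ""  -- Python raises ValueError here; excluded by Pre_
  | some max_count =>
    let columns := counts.map (fun n =>
      List.replicate (max_count - n).toNat ' ' ++ List.replicate n.toNat '#')
    let lines := (PySem.List.pyRange 0 max_count 1).map (fun r =>
      String.ofList (columns.map (fun col => PySem.List.pyGetD col r ' ')))
    PySem.Str.join "\n" (lines ++ [String.ofList chars])

-- ===== PRECONDITION & SPEC =====
-- Pre_ excludes exactly the inputs containing no counted character (only spaces/newlines or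
-- empty), on which A's `max()` raises ValueError (B's `max()` raises there too).
def Pre_text_histogram (input_text : String) : Prop :=
  input_text.toList.any (fun c => !(c == ' ' || c == '\n')) = true
instance (input_text : String) : Decidable (Pre_text_histogram input_text) := by
  unfold Pre_text_histogram; infer_instance

def pvWitness_text_histogram : String := "hello world"

def Spec_text_histogram (input_text : String) (out : String) : Prop := out = text_histogram_alt input_text
instance (input_text : String) (out : String) : Decidable (Spec_text_histogram input_text out) := by unfold Spec_text_histogram; infer_instance

-- ===== CLAIM (what is proved, stated in full; the proofs are below) =====
def Claim_equal_text_histogram : Prop := ∀ (input_text : String), Dom_text_histogram input_text → Pre_text_histogram input_text → Spec_text_histogram input_text (text_histogram input_text)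

-- ===== LEMMAS AND PROOFS =====

-- a loop that skips elements failing p is a loop over the filtered list
theorem foldl_if_skip {α β : Type} (p : α → Bool) (f : β → α → β) (l : List α) (init : β) :
    l.foldl (fun d c => if p c then f d c else d) init = (l.filter p).foldl f init := by
  induction l generalizing init with
  | nil => rfl
  | cons x t ih => by_cases h : p x <;> simp [h, ih]

-- 'row += g(c)' over strings, at the char-list level
theorem foldl_str_append {α : Type} (g : α → String) (l : List α) (acc : List Char) :
    l.foldl (fun r c => r ++ g c) (String.ofList acc)
      = String.ofList (acc ++ l.flatMap (fun c => (g c).toList)) := by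
  induction l generalizing acc with
  | nil => simp
  | cons x t ih =>
    have h : String.ofList acc ++ g x = String.ofList (acc ++ (g x).toList) := by
      apply String.toList_inj.mp; simp
    simp only [List.foldl_cons, h, ih, List.flatMap_cons, List.append_assoc]

-- max() with the identity key depends only on the multiset of values
theorem max?_id_perm {l1 l2 : List Int} (h : l1.Perm l2) :
    PySem.List.max? l1 (fun x => x) = PySem.List.max? l2 (fun x => x) := by
  cases e1 : PySem.List.max? l1 (fun x => x) with
  | none =>
    rw [PySem.List.max?_eq_none_iff] at e1
    subst e1
    rw [List.nil_perm.mp h]; exact ((PySem.List.max?_eq_none_iff [] (fun x => x)).mpr rfl).symm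
  | some m1 =>
    cases e2 : PySem.List.max? l2 (fun x => x) with
    | none =>
      rw [PySem.List.max?_eq_none_iff] at e2
      subst e2
      rw [List.nil_perm.mp h.symm] at e1
      simp [PySem.List.max?] at e1
    | some m2 =>
      have h1 := PySem.List.max?_isMax e1 m2 (h.symm.mem_iff.mp (PySem.List.max?_mem e2))
      have h2 := PySem.List.max?_isMax e2 m1 (h.mem_iff.mp (PySem.List.max?_mem e1))
      exact congrArg some (le_antisymm h2 h1)

-- reading the transposed column at row k
theorem col_get (n m : Int) (k : Nat) (h0 : 0 ≤ n) (h1 : n ≤ m) (hk : (k : Int) < m) :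
    PySem.List.pyGetD (List.replicate (m - n).toNat ' ' ++ List.replicate n.toNat '#') (k : Int) ' '
      = if n ≥ m - (k : Int) then '#' else ' ' := by
  rw [PySem.List.pyGetD_natCast]
  rcases lt_or_ge k (m - n).toNat with hlt | hge
  · rw [List.getD_eq_getElem?_getD, List.getElem?_append_left (by simpa using hlt)]
    simp only [List.getElem?_replicate, if_pos hlt, Option.getD_some]
    rw [if_neg (by omega)]
  · rw [List.getD_eq_getElem?_getD, List.getElem?_append_right (by simpa using hge)]
    have hk2 : k - (List.replicate (m - n).toNat ' ').length < n.toNat := by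
      simp only [List.length_replicate]; omega
    simp only [List.length_replicate] at hk2 ⊢
    rw [List.getElem?_replicate, if_pos hk2]
    simp only [Option.getD_some]
    rw [if_pos (by omega)]

-- ===== VERDICT (by name: the statement is the Claim_ definition above) =====
theorem text_histogram_spec : Claim_equal_text_histogram := by
  intro s _ hpre
  unfold Spec_text_histogram text_histogram text_histogram_alt
  simp only [foldl_if_skip, PySem.Dict.foldl_insert_getD_add_one_eq_counter,
    PySem.Dict.keys_counter, PySem.Dict.getD_counter]
  set F := List.filter (fun c => !(c == ' ' || c == '\n')) s.toList with hF
  set chars := PySem.List.sorted (PySem.Set.ofList F) (fun x => x) false with hchars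
  have hv : (PySem.Dict.counter F).values
      = (PySem.Set.ofList F).map (fun c => (List.count c F : Int)) := by
    simp only [PySem.Dict.values, PySem.Dict.items_counter, List.map_map]; rfl
  have hperm : (chars.map (fun c => (List.count c F : Int))).Perm
      ((PySem.Set.ofList F).map (fun c => (List.count c F : Int))) :=
    (PySem.List.sorted_perm _ _ _).map _
  rw [hv, max?_id_perm hperm.symm]
  have hFne : F ≠ [] := by
    unfold Pre_text_histogram at hpre
    rw [List.any_eq_true] at hpre
    obtain ⟨c, hc, hpc⟩ := hpre
    intro h
    have : c ∈ F := by rw [hF, List.mem_filter]; exact ⟨hc, hpc⟩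
    simp [h] at this
  cases e : PySem.List.max? (chars.map (fun c => (List.count c F : Int))) (fun x => x) with
  | none =>
    exfalso
    obtain ⟨c, hc⟩ := List.exists_mem_of_ne_nil F hFne
    have h1 : c ∈ chars := by
      rw [hchars, PySem.List.mem_sorted]
      exact (PySem.Set.mem_ofList _ _).mpr hc
    have : (List.count c F : Int) ∈ chars.map (fun c => (List.count c F : Int)) :=
      List.mem_map_of_mem h1
    rw [(PySem.List.max?_eq_none_iff _ _).mp e] at this
    simp at this
  | some m =>
    have hmax : ∀ y ∈ chars.map (fun c => (List.count c F : Int)), y ≤ m :=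
      PySem.List.max?_isMax e
    have hm0 : 0 ≤ m := by
      obtain ⟨c, -, hc⟩ := List.mem_map.mp (PySem.List.max?_mem e)
      omega
    -- rows: A's level-by-level fold = B's transposed columns
    simp only [PySem.List.foldl_append_singleton_eq_map, List.nil_append]
    have hrow : ∀ i : Int,
        chars.foldl (fun row char => row ++ if (List.count char F : Int) ≥ i then "#" else " ") ""
          = String.ofList (chars.map (fun c => if (List.count c F : Int) ≥ i then '#' else ' ')) := by
      intro i
      have h0 : ("" : String) = String.ofList [] := by
        apply String.toList_inj.mp; simp
      rw [h0, foldl_str_append]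
      refine congrArg String.ofList ?_
      simp only [List.nil_append]
      induction chars with
      | nil => rfl
      | cons x t ih =>
        simp only [List.flatMap_cons, List.map_cons, ih]
        by_cases hxi : (List.count x F : Int) ≥ i <;> simp [hxi]
    simp only [hrow, List.map_map, PySem.List.pyRange_neg_one, PySem.List.pyRange_one]
    simp only [Int.sub_zero]
    refine congrArg (fun ls => PySem.Str.join "\n" (ls ++ [String.ofList chars])) ?_
    apply List.map_congr_left
    intro k hk
    rw [List.mem_range] at hk
    have hkm : (k : Int) < m := by omega
    simp only [Function.comp]
    congr 1
    apply List.map_congr_left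
    intro c hc
    have hcnt_le : (List.count c F : Int) ≤ m := hmax _ (List.mem_map_of_mem hc)
    simp only [Function.comp]
    rw [show ((0 : Int) + (k : Int)) = (k : Int) by omega,
      col_get _ m k (by omega) hcnt_le hkm]
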